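-- pv_equiv track=rewrite | github.com/manu-eldho/placement_iskew | min_chairs_needed.py | min_chair
-- ===== SOURCE A (Python) =====
-- def min_chair(simulation):
--     chairs = 0
--     total_chairs = 0
--
--     for event in simulation:
--         if event in ['C', 'U']:
--             if chairs > 0:
--                 chairs -= 1
--             else:
--                 total_chairs += 1
--         elif event in ['R', 'L']:
--             chairs += 1
--
--     return total_chairs
-- ===== SOURCE B (Python) =====
-- def min_chair(simulation):
--     delta = {'C': 1, 'U': 1, 'R': -1, 'L': -1}
--     best = 0
--     for event in reversed(simulation):
--         best = max(0, delta.get(event, 0) + best)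
--     return best
-- ===== Notes on version B (the rewrite author's own statement) =====
-- stated objective: alternative
-- what changed: B scans the events in reverse with a delta table and folds best = max(0, delta + best), computing the maximum prefix occupancy as a backward max-plus fold instead of A's forward greedy free-chair pool with a pool-empty purchase branch.
import Mathlib
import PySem

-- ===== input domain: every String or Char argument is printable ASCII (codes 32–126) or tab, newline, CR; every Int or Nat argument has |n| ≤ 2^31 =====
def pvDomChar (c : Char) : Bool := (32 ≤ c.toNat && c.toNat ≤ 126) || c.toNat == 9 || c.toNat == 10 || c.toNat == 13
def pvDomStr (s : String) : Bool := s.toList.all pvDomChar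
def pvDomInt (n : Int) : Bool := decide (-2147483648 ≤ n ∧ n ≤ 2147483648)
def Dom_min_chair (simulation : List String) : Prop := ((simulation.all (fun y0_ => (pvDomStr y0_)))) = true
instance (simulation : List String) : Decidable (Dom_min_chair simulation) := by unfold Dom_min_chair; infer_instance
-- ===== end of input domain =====

-- B replaces A's forward greedy free-chair pool with a backward max-plus fold over a delta table (alternative decomposition, same cost).

-- ===== PORT A =====
-- loop state: (chairs = free pool, total_chairs = purchases so far)
def minChairGoA : List String → Int → Int → Int
  | [], _, total_chairs => total_chairs
  | event :: rest, chairs, total_chairs =>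
    if event = "C" ∨ event = "U" then
      if chairs > 0 then minChairGoA rest (chairs - 1) total_chairs
      else minChairGoA rest chairs (total_chairs + 1)
    else if event = "R" ∨ event = "L" then
      minChairGoA rest (chairs + 1) total_chairs
    else
      minChairGoA rest chairs total_chairs

def min_chair (simulation : List String) : Int := minChairGoA simulation 0 0

-- ===== PORT B =====
-- delta = {'C': 1, 'U': 1, 'R': -1, 'L': -1}
def pvDelta : PySem.Dict String Int :=
  PySem.Dict.ofList [("C", 1), ("U", 1), ("R", -1), ("L", -1)]

-- for event in reversed(simulation): best = max(0, delta.get(event, 0) + best)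
def min_chair_alt (simulation : List String) : Int :=
  simulation.reverse.foldl (fun best event => max 0 (PySem.Dict.getD pvDelta event 0 + best)) 0

-- ===== PRECONDITION & SPEC =====
def Spec_min_chair (simulation : List String) (out : Int) : Prop := out = min_chair_alt simulation
instance (simulation : List String) (out : Int) : Decidable (Spec_min_chair simulation out) := by unfold Spec_min_chair; infer_instance

-- ===== CLAIM (what is proved, stated in full; the proofs are below) =====
def Claim_equal_min_chair : Prop := ∀ (simulation : List String), Dom_min_chair simulation → Spec_min_chair simulation (min_chair simulation)

-- ===== LEMMAS AND PROOFS =====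
-- B as a foldr (reverse-foldl = foldr with flipped function)
def gB (simulation : List String) : Int :=
  simulation.foldr (fun event best => max 0 (PySem.Dict.getD pvDelta event 0 + best)) 0

theorem min_chair_alt_eq_gB (sim : List String) : min_chair_alt sim = gB sim := by
  simp [min_chair_alt, gB, List.foldl_reverse]

theorem gB_nonneg (sim : List String) : 0 ≤ gB sim := by
  cases sim <;> simp [gB]

theorem gB_cons (e : String) (rest : List String) :
    gB (e :: rest) = max 0 (PySem.Dict.getD pvDelta e 0 + gB rest) := rfl

-- Invariant linking A's pool state to B's suffix value:
-- with free pool c ≥ 0 and purchase count t, A's result is t + max(0, gB sim − c).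
theorem minChairGoA_eq (sim : List String) : ∀ (c t : Int), 0 ≤ c →
    minChairGoA sim c t = t + max 0 (gB sim - c) := by
  induction sim with
  | nil => intro c t hc; simp only [minChairGoA, gB, List.foldr]; omega
  | cons e rest ih =>
    intro c t hc
    have hr0 := gB_nonneg rest
    by_cases hcu : e = "C" ∨ e = "U"
    · have hd : PySem.Dict.getD pvDelta e 0 = 1 := by
        rcases hcu with h | h <;> subst h <;> decide
      rw [gB_cons, hd]
      by_cases hpos : c > 0
      · rw [minChairGoA, if_pos hcu, if_pos hpos, ih (c - 1) t (by omega)]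
        omega
      · rw [minChairGoA, if_pos hcu, if_neg hpos, ih c (t + 1) hc]
        omega
    · by_cases hrl : e = "R" ∨ e = "L"
      · have hd : PySem.Dict.getD pvDelta e 0 = -1 := by
          rcases hrl with h | h <;> subst h <;> decide
        rw [gB_cons, hd, minChairGoA, if_neg hcu, if_pos hrl, ih (c + 1) t (by omega)]
        omega
      · have hmk : pvDelta = PySem.Dict.mk [("C", 1), ("U", 1), ("R", -1), ("L", -1)] := by decide
        have hd : PySem.Dict.getD pvDelta e 0 = 0 := by
          rw [hmk]
          simp [PySem.Dict.getD, PySem.Dict.get?, List.find?,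
            show ("C" == e) = false from beq_eq_false_iff_ne.mpr (fun h => hcu (Or.inl h.symm)),
            show ("U" == e) = false from beq_eq_false_iff_ne.mpr (fun h => hcu (Or.inr h.symm)),
            show ("R" == e) = false from beq_eq_false_iff_ne.mpr (fun h => hrl (Or.inl h.symm)),
            show ("L" == e) = false from beq_eq_false_iff_ne.mpr (fun h => hrl (Or.inr h.symm))]
        rw [gB_cons, hd, minChairGoA, if_neg hcu, if_neg hrl, ih c t hc]
        omega
  
-- ===== VERDICT (by name: the statement is the Claim_ definition above) =====
theorem min_chair_spec : Claim_equal_min_chair := by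
  intro sim _
  unfold Spec_min_chair
  rw [min_chair_alt_eq_gB, min_chair, minChairGoA_eq sim 0 0 le_rfl]
  have := gB_nonneg sim
  omega
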